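-- pv_equiv track=rewrite | github.com/miliar/Code_Jam_Webscraper | solutions_python/Problem_138/1114.py | play_war
-- ===== SOURCE A (Python) =====
-- def play_war(n_blocks, k_blocks):
--
--     for i in range(len(n_blocks)):
--         n_block = n_blocks[i]
--         for j in range(len(k_blocks)):
--             if k_blocks[j] > n_block:
--                 k_blocks.pop(j)
--                 break
--
--     return len(k_blocks)
-- ===== SOURCE B (Python) =====
-- def play_war(n_blocks, k_blocks):
--     # Tournament max-tree over k_blocks: each n deletes the leftmost remaining
--     # element > n in O(log k) instead of A's O(k) scan-and-pop.
--     # (A mutates k_blocks in place; B does not. Return values agree.)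
--     if not k_blocks:
--         return 0
--
--     def build(lo, hi):
--         if hi - lo == 1:
--             return [k_blocks[lo]]          # leaf: [value or None]
--         mid = (lo + hi) // 2
--         l, r = build(lo, mid), build(mid, hi)
--         return [max_opt(l[0], r[0]), l, r]  # node: [max, left, right]
--
--     def max_opt(a, b):
--         if a is None:
--             return b
--         if b is None:
--             return a
--         return a if a >= b else b
--
--     def gt(mx, n):
--         return mx is not None and mx > n
--
--     def delete(t, n):
--         # delete leftmost leaf with value > n; caller ensures gt(t[0], n)
--         if len(t) == 1:
--             t[0] = None
--         else:
--             if gt(t[1][0], n):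
--                 delete(t[1], n)
--             else:
--                 delete(t[2], n)
--             t[0] = max_opt(t[1][0], t[2][0])
--
--     root = build(0, len(k_blocks))
--     remaining = len(k_blocks)
--     for n in n_blocks:
--         if gt(root[0], n):
--             delete(root, n)
--             remaining -= 1
--     return remaining
-- ===== Notes on version B (the rewrite author's own statement) =====
-- stated objective: faster
-- what changed: Replaces A's linear scan-and-pop of k_blocks for each n_block by a tournament max-tree over k_blocks in which the leftmost remaining element greater than n is located and deleted in O(log k) per query.
import Mathlib
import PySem

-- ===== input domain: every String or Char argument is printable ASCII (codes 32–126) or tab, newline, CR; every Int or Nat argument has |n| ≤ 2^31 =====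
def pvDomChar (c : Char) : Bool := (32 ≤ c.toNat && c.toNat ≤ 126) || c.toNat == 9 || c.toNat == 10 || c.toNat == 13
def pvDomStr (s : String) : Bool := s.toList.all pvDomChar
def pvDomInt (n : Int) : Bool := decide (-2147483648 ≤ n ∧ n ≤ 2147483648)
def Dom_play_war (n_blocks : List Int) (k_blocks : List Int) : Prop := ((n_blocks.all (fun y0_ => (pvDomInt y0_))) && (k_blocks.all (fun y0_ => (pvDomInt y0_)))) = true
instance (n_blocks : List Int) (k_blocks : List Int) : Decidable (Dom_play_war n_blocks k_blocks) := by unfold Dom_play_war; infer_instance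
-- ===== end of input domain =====

-- B replaces A's per-n linear scan-and-pop by a tournament max-tree (O(k + n log k) vs O(n*k));
-- A mutates k_blocks in place, B does not — the equivalence proved is about the return value.

-- ===== PORT A =====
-- inner loop: 'for j in range(len(k_blocks)): if k_blocks[j] > n_block: k_blocks.pop(j); break'
def aInnerGo (ks : List Int) (n : Int) : List Int → List Int
  | [] => ks
  | j :: rest =>
    match PySem.List.pyGet? ks j with
    | some v =>
      if v > n then
        match PySem.List.pop? ks j with
        | some r => r.2
        | none => ks          -- unreachable: j is a valid index
      else aInnerGo ks n rest
    | none => ks              -- unreachable: j ∈ range(len ks)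

def play_war (n_blocks : List Int) (k_blocks : List Int) : Int :=
  ((PySem.List.pyRange 0 n_blocks.length 1).foldl
    (fun ks i =>
      match PySem.List.pyGet? n_blocks i with
      | some nb => aInnerGo ks nb (PySem.List.pyRange 0 ks.length 1)
      | none => ks)           -- unreachable: i ∈ range(len n_blocks)
    k_blocks).length

-- ===== PORT B =====
-- tournament max-tree: leaf holds 'value or None' (None = deleted), node caches the max
inductive PTree : Type
  | leaf : Option Int → PTree
  | node : Option Int → PTree → PTree → PTree
deriving Repr

def mxOf : PTree → Option Int
  | .leaf o => o
  | .node m _ _ => m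

def maxOpt : Option Int → Option Int → Option Int
  | none, b => b
  | some a, none => some a
  | some a, some b => if a ≥ b then some a else some b

def gtO : Option Int → Int → Bool
  | some m, n => m > n
  | none, _ => false

def buildT (l : List Int) : PTree :=
  if h : l.length ≤ 1 then .leaf l.head?
  else
    let m := l.length / 2
    let lt := buildT (l.take m)
    let rt := buildT (l.drop m)
    .node (maxOpt (mxOf lt) (mxOf rt)) lt rt
termination_by l.length
decreasing_by
  · simp only [List.length_take]; omega
  · simp only [List.length_drop]; omega

def deleteT : PTree → Int → PTree
  | .leaf _, _ => .leaf none
  | .node _ l r, n =>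
    if gtO (mxOf l) n then
      let l' := deleteT l n
      .node (maxOpt (mxOf l') (mxOf r)) l' r
    else
      let r' := deleteT r n
      .node (maxOpt (mxOf l) (mxOf r')) l r'

def play_war_alt (n_blocks : List Int) (k_blocks : List Int) : Int :=
  if k_blocks = [] then 0
  else
    let root := buildT k_blocks
    (n_blocks.foldl
      (fun (st : PTree × Int) n =>
        if gtO (mxOf st.1) n then (deleteT st.1 n, st.2 - 1) else st)
      (root, (k_blocks.length : Int))).2

-- ===== PRECONDITION & SPEC =====
def Spec_play_war (n_blocks : List Int) (k_blocks : List Int) (out : Int) : Prop := out = play_war_alt n_blocks k_blocks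
instance (n_blocks : List Int) (k_blocks : List Int) (out : Int) : Decidable (Spec_play_war n_blocks k_blocks out) := by unfold Spec_play_war; infer_instance

-- ===== CLAIM (what is proved, stated in full; the proofs are below) =====
def Claim_equal_play_war : Prop := ∀ (n_blocks : List Int) (k_blocks : List Int), Dom_play_war n_blocks k_blocks → Spec_play_war n_blocks k_blocks (play_war n_blocks k_blocks)

-- ===== LEMMAS AND PROOFS =====

-- common specification: remove the first element greater than n (if any)
def removeFG (n : Int) : List Int → List Int
  | [] => []
  | x :: xs => if x > n then xs else x :: removeFG n xs

def hasGT (n : Int) (l : List Int) : Bool := l.any (fun x => decide (n < x))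

theorem removeFG_of_not_hasGT (n : Int) (l : List Int) (h : hasGT n l = false) :
    removeFG n l = l := by
  induction l with
  | nil => rfl
  | cons x xs ih =>
    rw [hasGT, List.any_cons, Bool.or_eq_false_iff] at h
    obtain ⟨h1, h2⟩ := h
    have hx : ¬ x > n := by simpa using h1
    rw [removeFG, if_neg hx, ih h2]

theorem removeFG_append_left (n : Int) (a b : List Int) (h : hasGT n a = true) :
    removeFG n (a ++ b) = removeFG n a ++ b := by
  induction a with
  | nil => simp [hasGT] at h
  | cons x xs ih =>
    by_cases hx : x > n
    · simp [removeFG, hx]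
    · rw [hasGT, List.any_cons] at h
      have h1 : decide (n < x) = false := by simpa using hx
      rw [h1, Bool.false_or] at h
      simp only [List.cons_append, removeFG, if_neg hx, ih h]

theorem removeFG_append_right (n : Int) (a b : List Int) (h : hasGT n a = false) :
    removeFG n (a ++ b) = a ++ removeFG n b := by
  induction a with
  | nil => simp
  | cons x xs ih =>
    rw [hasGT, List.any_cons, Bool.or_eq_false_iff] at h
    obtain ⟨h1, h2⟩ := h
    have hx : ¬ x > n := by simpa using h1
    simp only [List.cons_append, removeFG, if_neg hx, ih h2]

theorem removeFG_length (n : Int) (l : List Int) (h : hasGT n l = true) :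
    (removeFG n l).length + 1 = l.length := by
  induction l with
  | nil => simp [hasGT] at h
  | cons x xs ih =>
    by_cases hx : x > n
    · simp [removeFG, hx]
    · rw [hasGT, List.any_cons] at h
      have h1 : decide (n < x) = false := by simpa using hx
      rw [h1, Bool.false_or] at h
      rw [removeFG, if_neg hx]
      have := ih h
      simp only [List.length_cons]
      omega

-- ---------- A equals the specification ----------

theorem aInnerGo_range (ks : List Int) (n : Int) (j : Nat) (hj : j ≤ ks.length) :
    aInnerGo ks n (PySem.List.pyRange (j : Int) (ks.length : Int) 1)
      = ks.take j ++ removeFG n (ks.drop j) := by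
  induction hlen : ks.length - j generalizing j with
  | zero =>
    have : j = ks.length := by omega
    subst this
    rw [PySem.List.pyRange_one_eq_nil (by omega)]
    simp [aInnerGo, removeFG]
  | succ m ih =>
    have hjlt : j < ks.length := by omega
    rw [PySem.List.pyRange_one_cons (by exact_mod_cast hjlt)]
    show aInnerGo ks n (_ :: _) = _
    rw [aInnerGo]
    rw [PySem.List.pyGet?_natCast]
    rw [List.getElem?_eq_getElem hjlt]
    simp only
    by_cases hgt : ks[j] > n
    · rw [if_pos hgt]
      rw [PySem.List.pop?_natCast ks j hjlt]
      simp only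
      rw [List.eraseIdx_eq_take_drop_succ]
      have hdrop : ks.drop j = ks[j] :: ks.drop (j + 1) := (List.getElem_cons_drop hjlt).symm
      rw [hdrop, removeFG, if_pos hgt]
    · rw [if_neg hgt]
      have : ((j : Int) + 1) = ((j + 1 : Nat) : Int) := by push_cast; ring
      rw [this, ih (j + 1) (by omega) (by omega)]
      have hdrop : ks.drop j = ks[j] :: ks.drop (j + 1) := (List.getElem_cons_drop hjlt).symm
      rw [hdrop, removeFG, if_neg hgt]
      rw [List.take_add_one, List.getElem?_eq_getElem hjlt]
      simp only [Option.toList_some, List.append_assoc, List.singleton_append]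

theorem aInner_spec (ks : List Int) (n : Int) :
    aInnerGo ks n (PySem.List.pyRange 0 (ks.length : Int) 1) = removeFG n ks := by
  have := aInnerGo_range ks n 0 (Nat.zero_le _)
  simpa using this

theorem play_war_outer (nb : List Int) (j : Nat) (hj : j ≤ nb.length) (ks : List Int) :
    (PySem.List.pyRange (j : Int) (nb.length : Int) 1).foldl
      (fun ks i =>
        match PySem.List.pyGet? nb i with
        | some n => aInnerGo ks n (PySem.List.pyRange 0 ks.length 1)
        | none => ks) ks
    = (nb.drop j).foldl (fun ks n => removeFG n ks) ks := by
  induction hlen : nb.length - j generalizing j ks with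
  | zero =>
    have : j = nb.length := by omega
    subst this
    rw [PySem.List.pyRange_one_eq_nil (by omega)]
    simp
  | succ m ih =>
    have hjlt : j < nb.length := by omega
    rw [PySem.List.pyRange_one_cons (by exact_mod_cast hjlt)]
    rw [List.foldl_cons]
    have hget : PySem.List.pyGet? nb (j : Int) = some nb[j] := by
      rw [PySem.List.pyGet?_natCast, List.getElem?_eq_getElem hjlt]
    rw [hget]
    have hred : (match some nb[j] with
        | some n => aInnerGo ks n (PySem.List.pyRange 0 (ks.length : Int) 1)
        | none => ks) = removeFG nb[j] ks := aInner_spec ks nb[j]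
    rw [hred]
    have hdrop : nb.drop j = nb[j] :: nb.drop (j + 1) := (List.getElem_cons_drop hjlt).symm
    rw [hdrop, List.foldl_cons]
    have hcast : ((j : Int) + 1) = ((j + 1 : Nat) : Int) := by push_cast; ring
    rw [hcast, ih (j + 1) (by omega) _ (by omega)]

theorem play_war_eq_spec (n_blocks k_blocks : List Int) :
    play_war n_blocks k_blocks
      = ((n_blocks.foldl (fun ks n => removeFG n ks) k_blocks).length : Int) := by
  unfold play_war
  have := play_war_outer n_blocks 0 (Nat.zero_le _) k_blocks
  simp only [Nat.cast_zero, List.drop_zero] at this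
  rw [this]

-- ---------- B equals the specification ----------

def flatten : PTree → List Int
  | .leaf none => []
  | .leaf (some v) => [v]
  | .node _ l r => flatten l ++ flatten r

def WFT : PTree → Prop
  | .leaf _ => True
  | .node m l r => m = maxOpt (mxOf l) (mxOf r) ∧ WFT l ∧ WFT r

theorem gtO_maxOpt (a b : Option Int) (n : Int) :
    gtO (maxOpt a b) n = (gtO a n || gtO b n) := by
  cases a with
  | none => cases b <;> simp [maxOpt, gtO]
  | some x =>
    cases b with
    | none => simp [maxOpt, gtO]
    | some y =>
      simp only [maxOpt, gtO]
      by_cases h : x ≥ y <;> simp [h] <;> omega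

theorem gtO_mx_eq_hasGT (t : PTree) (n : Int) (hw : WFT t) :
    gtO (mxOf t) n = hasGT n (flatten t) := by
  induction t with
  | leaf o => cases o <;> simp [mxOf, flatten, hasGT, gtO]
  | node m l r ihl ihr =>
    obtain ⟨hm, hl, hr⟩ := hw
    rw [show flatten (.node m l r) = flatten l ++ flatten r from rfl,
        show hasGT n (flatten l ++ flatten r)
            = (hasGT n (flatten l) || hasGT n (flatten r)) from by simp [hasGT],
        show mxOf (.node m l r) = m from rfl, hm, gtO_maxOpt,
        ihl hl, ihr hr]

theorem deleteT_spec (t : PTree) (n : Int) (hw : WFT t) (hg : gtO (mxOf t) n = true) :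
    WFT (deleteT t n) ∧ flatten (deleteT t n) = removeFG n (flatten t) := by
  induction t with
  | leaf o =>
    cases o with
    | none => simp [mxOf, gtO] at hg
    | some v =>
      simp only [mxOf, gtO, decide_eq_true_eq] at hg
      refine ⟨trivial, ?_⟩
      show ([] : List Int) = removeFG n [v]
      rw [removeFG, if_pos hg]
  | node m l r ihl ihr =>
    obtain ⟨hm, hl, hr⟩ := hw
    have hg' : (gtO (mxOf l) n || gtO (mxOf r) n) = true := by
      have h0 : gtO m n = true := hg
      rw [hm, gtO_maxOpt] at h0
      exact h0
    by_cases hgl : gtO (mxOf l) n = true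
    · obtain ⟨hwl', hfl'⟩ := ihl hl hgl
      constructor
      · show WFT (deleteT (.node m l r) n)
        simp only [deleteT]
        rw [if_pos hgl]
        exact ⟨rfl, hwl', hr⟩
      · show flatten (deleteT (.node m l r) n) = _
        simp only [deleteT]
        rw [if_pos hgl]
        show flatten (deleteT l n) ++ flatten r = removeFG n (flatten l ++ flatten r)
        rw [hfl', removeFG_append_left n _ _ (by rw [← gtO_mx_eq_hasGT l n hl]; exact hgl)]
    · have hgr : gtO (mxOf r) n = true := by
        rcases Bool.or_eq_true_iff.mp hg' with h | h
        · exact absurd h hgl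
        · exact h
      obtain ⟨hwr', hfr'⟩ := ihr hr hgr
      have hnl : hasGT n (flatten l) = false := by
        rw [← gtO_mx_eq_hasGT l n hl]
        simpa using hgl
      constructor
      · show WFT (deleteT (.node m l r) n)
        simp only [deleteT]
        rw [if_neg hgl]
        exact ⟨rfl, hl, hwr'⟩
      · show flatten (deleteT (.node m l r) n) = _
        simp only [deleteT]
        rw [if_neg hgl]
        show flatten l ++ flatten (deleteT r n) = removeFG n (flatten l ++ flatten r)
        rw [hfr', removeFG_append_right n _ _ hnl]

theorem buildT_spec (l : List Int) : WFT (buildT l) ∧ flatten (buildT l) = l := by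
  induction l using buildT.induct with
  | case1 l h =>
    rw [buildT, dif_pos h]
    interval_cases hl : l.length
    · have : l = [] := List.length_eq_zero_iff.mp hl
      subst this; simp [WFT, flatten]
    · obtain ⟨v, hv⟩ := List.length_eq_one_iff.mp hl
      subst hv; simp [WFT, flatten]
  | case2 l h m ihl ihr =>
    rw [buildT, dif_neg h]
    refine ⟨⟨rfl, ihl.1, ihr.1⟩, ?_⟩
    show flatten (buildT (l.take _)) ++ flatten (buildT (l.drop _)) = l
    rw [ihl.2, ihr.2, List.take_append_drop]

theorem foldl_removeFG_nil (ns : List Int) :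
    ns.foldl (fun ks n => removeFG n ks) [] = [] := by
  induction ns with
  | nil => rfl
  | cons n ns ih => simpa [removeFG] using ih

theorem alt_fold_inv (ns : List Int) (t : PTree) (hw : WFT t) :
    (ns.foldl
      (fun (st : PTree × Int) n =>
        if gtO (mxOf st.1) n then (deleteT st.1 n, st.2 - 1) else st)
      (t, ((flatten t).length : Int))).2
    = ((ns.foldl (fun ks n => removeFG n ks) (flatten t)).length : Int) := by
  induction ns generalizing t with
  | nil => rfl
  | cons n ns ih =>
    simp only [List.foldl_cons]
    by_cases hg : gtO (mxOf t) n = true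
    · obtain ⟨hw', hf'⟩ := deleteT_spec t n hw hg
      rw [if_pos hg]
      have hlen : ((flatten t).length : Int) - 1 = ((flatten (deleteT t n)).length : Int) := by
        rw [hf']
        have := removeFG_length n (flatten t) (by rw [← gtO_mx_eq_hasGT t n hw]; exact hg)
        push_cast [← this]
        ring
      rw [hlen, ih (deleteT t n) hw', hf']
    · rw [if_neg hg]
      have hfix : removeFG n (flatten t) = flatten t := by
        apply removeFG_of_not_hasGT
        rw [← gtO_mx_eq_hasGT t n hw]
        simpa using hg
      rw [ih t hw, hfix]

theorem play_war_alt_eq_spec (n_blocks k_blocks : List Int) :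
    play_war_alt n_blocks k_blocks
      = ((n_blocks.foldl (fun ks n => removeFG n ks) k_blocks).length : Int) := by
  unfold play_war_alt
  by_cases hk : k_blocks = []
  · simp [hk, foldl_removeFG_nil]
  · rw [if_neg hk]
    obtain ⟨hw, hf⟩ := buildT_spec k_blocks
    have := alt_fold_inv n_blocks (buildT k_blocks) hw
    rw [hf] at this
    simpa using this

-- ===== VERDICT (by name: the statement is the Claim_ definition above) =====
theorem play_war_spec : Claim_equal_play_war := by
  intro n_blocks k_blocks _
  unfold Spec_play_war
  rw [play_war_eq_spec, play_war_alt_eq_spec]
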